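-- pv_equiv track=rewrite | github.com/nate-parrott/Flashlight | flashlightplugins/util.py | language_suffixes
-- ===== SOURCE A (Python) =====
-- def language_suffixes(languages):
--     for lang in languages:
--         while True:
--             yield "_" + lang if lang != 'en' else ''
--             if '-' in lang:
--                 lang = lang[:lang.rfind('-')]
--             else:
--                 break
--     yield ''
-- ===== SOURCE B (Python) =====
-- def language_suffixes(languages):
--     for lang in languages:
--         stack = []
--         cur = ""
--         for ch in lang:
--             if ch == '-':
--                 stack.append(cur)
--             cur += ch
--         stack.append(cur)
--         while stack:
--             p = stack.pop()
--             yield '' if p == 'en' else '_' + p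
--     yield ''
-- ===== Notes on version B (the rewrite author's own statement) =====
-- stated objective: alternative
-- what changed: Replaces A's per-language repeated rfind('-')-and-slice while-loop (rescanning the string for each suffix) by a single forward scan that pushes every dash-prefix on a stack and then pops the stack to emit the suffixes back-to-front.
import Mathlib
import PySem

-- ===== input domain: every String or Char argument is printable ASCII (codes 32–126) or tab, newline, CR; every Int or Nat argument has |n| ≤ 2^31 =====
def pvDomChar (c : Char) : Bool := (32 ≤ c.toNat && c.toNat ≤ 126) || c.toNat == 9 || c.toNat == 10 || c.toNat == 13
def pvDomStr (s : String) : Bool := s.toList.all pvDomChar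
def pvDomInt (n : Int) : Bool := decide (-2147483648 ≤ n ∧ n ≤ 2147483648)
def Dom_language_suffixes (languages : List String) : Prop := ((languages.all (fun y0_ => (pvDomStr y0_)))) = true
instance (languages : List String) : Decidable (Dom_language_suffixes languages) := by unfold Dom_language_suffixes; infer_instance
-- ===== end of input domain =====

-- B replaces A's repeated rfind('-')-and-slice while-loop by one forward scan per language that
-- pushes each dash-prefix on a stack and pops it back-to-front (objective: alternative decomposition).

-- ===== PORT A =====
-- termination lemmas for the inner while-loop (the slice at rfind('-') is strictly shorter)
theorem pv_go_last (ys xs : List Char) (hys : '-' ∉ ys) :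
    ∀ k, xs.length ≤ k → PySem.Chars.rfind.go (xs ++ '-' :: ys) ['-'] k = (xs.length : Int) := by
  intro k
  induction k with
  | zero =>
    intro hk
    have hx : xs = [] := List.eq_nil_of_length_eq_zero (Nat.le_zero.mp hk)
    subst hx
    simp [PySem.Chars.rfind.go, List.isPrefixOf]
  | succ j ih =>
    intro hk
    rcases Nat.lt_or_ge j xs.length with hj | hj
    · -- xs.length = j + 1 : the prefix test at j+1 hits the last dash
      have hxl : xs.length = j + 1 := Nat.le_antisymm hk hj
      have hdrop : (xs ++ '-' :: ys).drop (j + 1) = '-' :: ys := by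
        rw [← hxl]; exact List.drop_left
      simp [PySem.Chars.rfind.go, hdrop, List.isPrefixOf, hxl]
    · -- j + 1 > xs.length : no dash at index j+1, recurse
      have hdrop : (xs ++ '-' :: ys).drop (j + 1) = ys.drop (j - xs.length) := by
        rw [List.drop_append]
        have e0 : xs.drop (j + 1) = [] := List.drop_eq_nil_of_le (by omega)
        have e1 : j + 1 - xs.length = (j - xs.length) + 1 := by omega
        rw [e0, e1, List.drop_succ_cons, List.nil_append]
      have hpref : (['-'] : List Char).isPrefixOf ((xs ++ '-' :: ys).drop (j + 1)) = false := by
        rw [hdrop]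
        cases hcase : ys.drop (j - xs.length) with
        | nil => simp [List.isPrefixOf]
        | cons c t =>
          have hc : c ∈ ys := by
            have : c ∈ ys.drop (j - xs.length) := by rw [hcase]; exact List.mem_cons_self
            exact List.mem_of_mem_drop this
          have : c ≠ '-' := fun h => hys (h ▸ hc)
          simp [List.isPrefixOf, Ne.symm this]
      have hrec := ih hj
      simp [PySem.Chars.rfind.go, hpref, hrec]

theorem pv_rfind_last (xs ys : List Char) (hys : '-' ∉ ys) :
    PySem.Chars.rfind (xs ++ '-' :: ys) ['-'] = (xs.length : Int) := by
  unfold PySem.Chars.rfind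
  exact pv_go_last ys xs hys _ (by simp)

theorem pv_exists_last_dash {cs : List Char} (h : '-' ∈ cs) :
    ∃ xs ys, cs = xs ++ '-' :: ys ∧ '-' ∉ ys := by
  induction cs with
  | nil => cases h
  | cons c t ih =>
    by_cases ht : '-' ∈ t
    · obtain ⟨xs, ys, rfl, hys⟩ := ih ht
      exact ⟨c :: xs, ys, rfl, hys⟩
    · have hc : c = '-' := by
        rcases List.mem_cons.mp h with h1 | h1
        · exact h1.symm
        · exact absurd h1 ht
      exact ⟨[], t, by simp [hc], ht⟩

theorem pv_isIn_dash (cs : List Char) : PySem.Chars.isIn ['-'] cs = true ↔ '-' ∈ cs := by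
  rw [PySem.Chars.isIn_iff_infix]
  constructor
  · intro h; exact h.subset List.mem_cons_self
  · intro h
    obtain ⟨xs, ys, rfl⟩ := List.append_of_mem h
    exact ⟨xs, ys, by simp⟩

theorem pv_slice_len_lt {cs : List Char} (h : PySem.Chars.isIn ['-'] cs = true) :
    (PySem.Chars.slice cs none (some (PySem.Chars.rfind cs ['-']))).length < cs.length := by
  obtain ⟨xs, ys, rfl, hys⟩ := pv_exists_last_dash ((pv_isIn_dash cs).mp h)
  rw [pv_rfind_last xs ys hys]
  simp [PySem.Chars.slice_eq_listSlice, PySem.List.slice_to _ (Int.natCast_nonneg _)]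

-- inner `while True:` loop of A: yield, then trim at the last '-' or break
def pvInnerA (cs : List Char) : List String :=
  (if cs ≠ "en".toList then [String.mk ('_' :: cs)] else [""]) ++
  (if _h : PySem.Chars.isIn ['-'] cs = true then
      pvInnerA (PySem.Chars.slice cs none (some (PySem.Chars.rfind cs ['-'])))
    else [])
termination_by cs.length
decreasing_by exact pv_slice_len_lt _h

def language_suffixes (languages : List String) : List String :=
  (languages.foldl (fun acc lang => acc ++ pvInnerA lang.toList) []) ++ [""]

-- ===== PORT B =====
-- `for ch in lang:` loop of B: state (cur, stack); push cur on the stack at each '-'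
def pvBsLoop : List Char → List Char → List (List Char) → List Char × List (List Char)
  | [], cur, st => (cur, st)
  | c :: rest, cur, st => pvBsLoop rest (cur ++ [c]) (if c = '-' then st ++ [cur] else st)

-- `while stack: p = stack.pop(); yield …` = map the emit over the reversed stack
def pvEmit (p : List Char) : String :=
  if p = "en".toList then "" else String.mk ('_' :: p)

def pvInnerB (cs : List Char) : List String :=
  let r := pvBsLoop cs [] []
  ((r.2 ++ [r.1]).reverse).map pvEmit

def language_suffixes_alt (languages : List String) : List String :=
  (languages.foldl (fun acc lang => acc ++ pvInnerB lang.toList) []) ++ [""]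

-- ===== PRECONDITION & SPEC =====
def Spec_language_suffixes (languages : List String) (out : List String) : Prop := out = language_suffixes_alt languages
instance (languages : List String) (out : List String) : Decidable (Spec_language_suffixes languages out) := by unfold Spec_language_suffixes; infer_instance

-- ===== CLAIM (what is proved, stated in full; the proofs are below) =====
def Claim_equal_language_suffixes : Prop := ∀ (languages : List String), Dom_language_suffixes languages → Spec_language_suffixes languages (language_suffixes languages)

-- ===== LEMMAS AND PROOFS =====
theorem pvBsLoop_fst (cs : List Char) : ∀ cur st, (pvBsLoop cs cur st).1 = cur ++ cs := by
  induction cs with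
  | nil => intro cur st; simp [pvBsLoop]
  | cons c rest ih => intro cur st; simp [pvBsLoop, ih]

theorem pvBsLoop_snd_nodash {cs : List Char} (h : '-' ∉ cs) : ∀ cur st, (pvBsLoop cs cur st).2 = st := by
  induction cs with
  | nil => intro cur st; simp [pvBsLoop]
  | cons c rest ih =>
    intro cur st
    have hc : c ≠ '-' := fun hc => h (hc ▸ List.mem_cons_self)
    have hr : '-' ∉ rest := fun hr => h (List.mem_cons_of_mem _ hr)
    simp [pvBsLoop, hc, ih hr]

theorem pvBsLoop_append (xs : List Char) : ∀ ys cur st,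
    pvBsLoop (xs ++ ys) cur st = pvBsLoop ys (cur ++ xs) (pvBsLoop xs cur st).2 := by
  induction xs with
  | nil => intro ys cur st; simp [pvBsLoop]
  | cons c rest ih => intro ys cur st; simp [pvBsLoop, ih]

-- the stack of cs = xs ++ '-'::ys ('-' ∉ ys) is the stack of xs with cs on top
theorem pv_stack_split (xs ys : List Char) (hys : '-' ∉ ys) :
    (pvBsLoop (xs ++ '-' :: ys) [] []).2 = (pvBsLoop xs [] []).2 ++ [xs] := by
  rw [pvBsLoop_append]
  simp [pvBsLoop, pvBsLoop_snd_nodash hys]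

theorem pvInner_eq (cs : List Char) : pvInnerA cs = pvInnerB cs := by
  by_cases h : PySem.Chars.isIn ['-'] cs = true
  · obtain ⟨xs, ys, hcs, hys⟩ := pv_exists_last_dash ((pv_isIn_dash cs).mp h)
    subst hcs
    have hslice : PySem.Chars.slice (xs ++ '-' :: ys) none
        (some (PySem.Chars.rfind (xs ++ '-' :: ys) ['-'])) = xs := by
      rw [pv_rfind_last xs ys hys]
      simp [PySem.Chars.slice_eq_listSlice, PySem.List.slice_to _ (Int.natCast_nonneg _)]
    rw [pvInnerA, dif_pos h, hslice, pvInner_eq xs]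
    -- B side: stack (xs ++ '-'::ys) = stack xs ++ [xs ++ '-'::ys]
    show _ ++ pvInnerB xs = pvInnerB (xs ++ '-' :: ys)
    simp only [pvInnerB, pv_stack_split xs ys hys, pvBsLoop_fst]
    simp only [List.nil_append, List.append_assoc, List.reverse_append, List.map_append,
      List.reverse_cons, List.reverse_nil, List.map_cons, List.map_nil]
    -- emit agreement: A writes `if cs ≠ en then _cs else ''`, B writes `if cs = en then '' else _cs`
    by_cases he : xs ++ '-' :: ys = ['e', 'n'] <;> simp [pvEmit, he]
  · have hne : '-' ∉ cs := fun hm => h ((pv_isIn_dash cs).mpr hm)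
    rw [pvInnerA, dif_neg h]
    simp only [pvInnerB, pvBsLoop_snd_nodash hne, pvBsLoop_fst, List.nil_append,
      List.reverse_cons, List.reverse_nil, List.nil_append, List.map_cons, List.map_nil]
    have hen : "en".toList = ['e', 'n'] := rfl
    by_cases he : cs = ['e', 'n'] <;> simp [pvEmit, hen, he]
termination_by cs.length
decreasing_by rename_i hcs _; subst hcs; simp only [List.length_append, List.length_cons]; omega

theorem pv_foldl_eq (languages : List String) : ∀ acc : List String,
    languages.foldl (fun acc lang => acc ++ pvInnerA lang.toList) acc
      = languages.foldl (fun acc lang => acc ++ pvInnerB lang.toList) acc := by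
  intro acc
  simp only [pvInner_eq]

-- ===== VERDICT (by name: the statement is the Claim_ definition above) =====
theorem language_suffixes_spec : Claim_equal_language_suffixes := by
  intro languages _
  show language_suffixes languages = language_suffixes_alt languages
  unfold language_suffixes language_suffixes_alt
  rw [pv_foldl_eq]
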